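-- pv_equiv track=rewrite | github.com/jithinsaireddy/HLX-English-Programming | english_programming/src/vm/extension_handler.py | find_block_end
-- ===== SOURCE A (Python) =====
-- def find_block_end(instructions, start_index):
--     """Find the end of a block starting at start_index"""
--     block_depth = 0
--     i = start_index + 1
--
--     while i < len(instructions):
--         if instructions[i] == "BLOCK_START":
--             block_depth += 1
--         elif instructions[i] == "BLOCK_END":
--             if block_depth == 0:
--                 # Found the end of this block
--                 return i + 1
--             block_depth -= 1
--         i += 1
--
--     # If we don't find the end, return the end of instructions
--     return len(instructions)
-- ===== SOURCE B (Python) =====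
-- def find_block_end(instructions, start_index):
--     """Find the end of a block starting at start_index (recursive descent)."""
--     def scan(i):
--         # Return the index just past the BLOCK_END that closes the block
--         # whose body starts at i, or len(instructions) if it never closes.
--         while i < len(instructions):
--             instr = instructions[i]
--             if instr == "BLOCK_START":
--                 i = scan(i + 1)  # skip the whole nested block
--             elif instr == "BLOCK_END":
--                 return i + 1
--             else:
--                 i += 1
--         return len(instructions)
--
--     return scan(start_index + 1)
-- ===== Notes on version B (the rewrite author's own statement) =====
-- stated objective: alternative
-- what changed: Replaces A's flat scan with an integer depth counter by recursive descent over the nested block structure: a helper scans siblings and skips each nested BLOCK_START block via a recursive call to its own end index; Pre_ excludes exactly the inputs where A raises IndexError (start_index + 1 < -len(instructions)), where B raises too.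
import Mathlib
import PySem

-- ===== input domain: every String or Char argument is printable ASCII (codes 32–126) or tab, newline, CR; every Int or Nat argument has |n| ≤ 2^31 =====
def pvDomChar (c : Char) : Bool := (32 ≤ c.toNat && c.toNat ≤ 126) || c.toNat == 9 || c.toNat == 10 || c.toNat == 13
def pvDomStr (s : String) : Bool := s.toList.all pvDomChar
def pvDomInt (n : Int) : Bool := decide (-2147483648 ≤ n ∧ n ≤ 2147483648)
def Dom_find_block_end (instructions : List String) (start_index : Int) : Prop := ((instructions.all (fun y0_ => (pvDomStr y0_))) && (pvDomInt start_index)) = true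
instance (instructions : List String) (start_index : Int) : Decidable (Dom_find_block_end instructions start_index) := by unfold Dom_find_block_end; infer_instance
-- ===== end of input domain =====

-- B replaces A's integer depth counter by recursive descent over the nested block
-- structure (a nested BLOCK_START is skipped by a recursive call); same cost, different shape.

-- ===== PORT A =====
-- A's while loop with the depth counter, as structural recursion over the same state
-- (block_depth, i); instructions[i] (Python negative indexing) is PySem.List.pyGet?;
-- inside Pre_ the index is always in range, so the `getD ""` default is never taken.
def goA (instructions : List String) (block_depth : Int) (i : Int) : Int :=
  if h : i < (instructions.length : Int) then
    let instr := (PySem.List.pyGet? instructions i).getD ""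
    if instr = "BLOCK_START" then goA instructions (block_depth + 1) (i + 1)
    else if instr = "BLOCK_END" then
      if block_depth = 0 then i + 1
      else goA instructions (block_depth - 1) (i + 1)
    else goA instructions block_depth (i + 1)
  else (instructions.length : Int)
termination_by ((instructions.length : Int) - i).toNat
decreasing_by all_goals omega

def find_block_end (instructions : List String) (start_index : Int) : Int :=
  goA instructions 0 (start_index + 1)

-- ===== PORT B =====
-- B's `scan`: the inner while loop becomes recursion on the cursor; a nested block is
-- skipped by the recursive call `scan (scan (i+1))`. The Nat fuel (2*len+2, enough for
-- every cursor admitted by Pre_) is only a totality guard for Lean's termination checker.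
def goB (instructions : List String) : Nat → Int → Int
  | 0, _ => (instructions.length : Int)
  | fuel + 1, i =>
    if i < (instructions.length : Int) then
      let instr := (PySem.List.pyGet? instructions i).getD ""
      if instr = "BLOCK_START" then goB instructions fuel (goB instructions fuel (i + 1))
      else if instr = "BLOCK_END" then i + 1
      else goB instructions fuel (i + 1)
    else (instructions.length : Int)

def find_block_end_alt (instructions : List String) (start_index : Int) : Int :=
  goB instructions (2 * instructions.length + 2) (start_index + 1)

-- ===== PRECONDITION & SPEC =====
-- Pre_ excludes exactly the inputs on which the Python A raises IndexError
-- (start_index + 1 below -len(instructions)); Python B raises there too.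
def Pre_find_block_end (instructions : List String) (start_index : Int) : Prop :=
  -(instructions.length : Int) ≤ start_index + 1
instance (instructions : List String) (start_index : Int) : Decidable (Pre_find_block_end instructions start_index) := by unfold Pre_find_block_end; infer_instance

def pvWitness_find_block_end : List String × Int :=
  (["BLOCK_START", "x", "BLOCK_END", "BLOCK_END"], 0)

def Spec_find_block_end (instructions : List String) (start_index : Int) (out : Int) : Prop := out = find_block_end_alt instructions start_index
instance (instructions : List String) (start_index : Int) (out : Int) : Decidable (Spec_find_block_end instructions start_index out) := by unfold Spec_find_block_end; infer_instance

-- ===== CLAIM (what is proved, stated in full; the proofs are below) =====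
def Claim_equal_find_block_end : Prop := ∀ (instructions : List String) (start_index : Int), Dom_find_block_end instructions start_index → Pre_find_block_end instructions start_index → Spec_find_block_end instructions start_index (find_block_end instructions start_index)

-- ===== LEMMAS AND PROOFS =====

-- One-step unfolding of goB at successor fuel (used with rw; simp would over-unfold).
theorem goB_succ (instructions : List String) (f : Nat) (i : Int) :
    goB instructions (f + 1) i =
      if i < (instructions.length : Int) then
        if (PySem.List.pyGet? instructions i).getD "" = "BLOCK_START" then
          goB instructions f (goB instructions f (i + 1))
        else if (PySem.List.pyGet? instructions i).getD "" = "BLOCK_END" then i + 1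
        else goB instructions f (i + 1)
      else (instructions.length : Int) := rfl

-- Bounds and fuel-irrelevance for goB, by induction on the fuel.
theorem goB_props (instructions : List String) :
    ∀ f i, ((instructions.length : Int) - i).toNat < f →
      (goB instructions (f + 1) i = goB instructions f i ∧
       (i < (instructions.length : Int) →
          i + 1 ≤ goB instructions f i ∧ goB instructions f i ≤ (instructions.length : Int)) ∧
       ((instructions.length : Int) ≤ i → goB instructions f i = (instructions.length : Int))) := by
  intro f
  induction f with
  | zero => intro i h; omega
  | succ f ih =>
    intro i h
    by_cases hi : i < (instructions.length : Int)
    · have hf1 : ((instructions.length : Int) - (i + 1)).toNat < f := by omega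
      obtain ⟨ih_eq, ih_lt, ih_ge⟩ := ih (i + 1) hf1
      by_cases hs : (PySem.List.pyGet? instructions i).getD "" = "BLOCK_START"
      · -- nested block: recursive skip
        have he : i + 1 ≤ goB instructions f (i + 1) ∧
            goB instructions f (i + 1) ≤ (instructions.length : Int) := by
          by_cases hi1 : i + 1 < (instructions.length : Int)
          · have := ih_lt hi1; omega
          · have := ih_ge (by omega); omega
        have hfe : ((instructions.length : Int) - goB instructions f (i + 1)).toNat < f := by omega
        obtain ⟨e_eq, e_lt, e_ge⟩ := ih (goB instructions f (i + 1)) hfe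
        constructor
        · show goB instructions (f + 1 + 1) i = goB instructions (f + 1) i
          rw [goB_succ instructions (f + 1) i, goB_succ instructions f i,
            if_pos hi, if_pos hi, if_pos hs, if_pos hs, ih_eq, e_eq]
        constructor
        · intro _
          rw [goB_succ instructions f i, if_pos hi, if_pos hs]
          by_cases hen : goB instructions f (i + 1) < (instructions.length : Int)
          · have := e_lt hen; omega
          · have := e_ge (by omega); omega
        · intro hge; omega
      · by_cases he : (PySem.List.pyGet? instructions i).getD "" = "BLOCK_END"
        · constructor
          · show goB instructions (f + 2) i = goB instructions (f + 1) i
            simp only [goB, if_pos hi, if_neg hs, if_pos he]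
          constructor
          · intro _
            simp only [goB, if_pos hi, if_neg hs, if_pos he]
            omega
          · intro hge; omega
        · -- ordinary instruction
          constructor
          · show goB instructions (f + 1 + 1) i = goB instructions (f + 1) i
            rw [goB_succ instructions (f + 1) i, goB_succ instructions f i,
              if_pos hi, if_pos hi, if_neg hs, if_neg hs, if_neg he, if_neg he, ih_eq]
          constructor
          · intro _
            rw [goB_succ instructions f i, if_pos hi, if_neg hs, if_neg he]
            by_cases hi1 : i + 1 < (instructions.length : Int)
            · have := ih_lt hi1; omega
            · have := ih_ge (by omega); omega
          · intro hge; omega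
    · refine ⟨?_, fun h' => absurd h' hi, fun _ => ?_⟩
      · show goB instructions (f + 1 + 1) i = goB instructions (f + 1) i
        rw [goB_succ instructions (f + 1) i, goB_succ instructions f i, if_neg hi, if_neg hi]
      · rw [goB_succ instructions f i, if_neg hi]

theorem goB_stable (instructions : List String) :
    ∀ g f i, ((instructions.length : Int) - i).toNat < f → f ≤ g →
      goB instructions g i = goB instructions f i := by
  intro g
  induction g with
  | zero => intro f i h hle; omega
  | succ g ih =>
    intro f i h hle
    rcases Nat.lt_or_ge f (g + 1) with hlt | hge
    · have : goB instructions (g + 1) i = goB instructions g i :=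
        (goB_props instructions g i (by omega)).1
      rw [this, ih f i h (by omega)]
    · have : f = g + 1 := by omega
      rw [this]

-- `pvF` is B's scan with its canonical fuel (the one find_block_end_alt uses).
def pvF (instructions : List String) (i : Int) : Int :=
  goB instructions (2 * instructions.length + 2) i

theorem pvF_bounds (instructions : List String) (i : Int)
    (hlo : -(instructions.length : Int) ≤ i) :
    (i < (instructions.length : Int) →
      i + 1 ≤ pvF instructions i ∧ pvF instructions i ≤ (instructions.length : Int)) ∧
    ((instructions.length : Int) ≤ i → pvF instructions i = (instructions.length : Int)) := by
  have h := goB_props instructions (2 * instructions.length + 1) i (by omega)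
  have hs : pvF instructions i = goB instructions (2 * instructions.length + 1) i := by
    unfold pvF
    exact (goB_props instructions (2 * instructions.length + 1) i (by omega)).1
  exact ⟨fun hi => by rw [hs]; exact h.2.1 hi, fun hi => by rw [hs]; exact h.2.2 hi⟩

theorem pvF_stop (instructions : List String) (i : Int)
    (hi : (instructions.length : Int) ≤ i) : pvF instructions i = (instructions.length : Int) := by
  unfold pvF
  exact (goB_props instructions (2 * instructions.length + 2) i (by omega)).2.2 hi

-- One unfolding of pvF at an in-range cursor, with the nested calls re-fuelled to pvF.
theorem pvF_unfold (instructions : List String) (i : Int)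
    (hlo : -(instructions.length : Int) ≤ i) (hi : i < (instructions.length : Int)) :
    pvF instructions i =
      (if (PySem.List.pyGet? instructions i).getD "" = "BLOCK_START" then
        pvF instructions (pvF instructions (i + 1))
       else if (PySem.List.pyGet? instructions i).getD "" = "BLOCK_END" then i + 1
       else pvF instructions (i + 1)) := by
  have h1 : goB instructions (2 * instructions.length + 1) (i + 1) = pvF instructions (i + 1) := by
    unfold pvF
    exact (goB_stable instructions (2 * instructions.length + 2)
      (2 * instructions.length + 1) (i + 1) (by omega) (by omega)).symm
  have he : -(instructions.length : Int) ≤ pvF instructions (i + 1) := by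
    have hb := pvF_bounds instructions (i + 1) (by omega)
    by_cases hi1 : i + 1 < (instructions.length : Int)
    · have := (hb.1 hi1); omega
    · have := hb.2 (by omega); omega
  have h2 : goB instructions (2 * instructions.length + 1) (pvF instructions (i + 1)) =
      pvF instructions (pvF instructions (i + 1)) := by
    unfold pvF
    exact (goB_stable instructions (2 * instructions.length + 2)
      (2 * instructions.length + 1) (pvF instructions (i + 1)) (by omega) (by omega)).symm
  show goB instructions (2 * instructions.length + 1 + 1) i = _
  rw [goB_succ instructions (2 * instructions.length + 1) i, if_pos hi, h1, h2]

-- Iterating B's scan d+1 times (A's depth counter d corresponds to d pending closes).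
def pvIter (instructions : List String) : Nat → Int → Int
  | 0, i => i
  | k + 1, i => pvIter instructions k (pvF instructions i)

theorem pvIter_stop (instructions : List String) :
    ∀ k, pvIter instructions k (instructions.length : Int) = (instructions.length : Int) := by
  intro k
  induction k with
  | zero => rfl
  | succ k ih =>
    show pvIter instructions k (pvF instructions (instructions.length : Int)) = _
    rw [pvF_stop instructions _ le_rfl, ih]

-- Main invariant: A's loop at depth d and cursor i equals d+1 iterations of B's scan.
theorem goA_eq_iter (instructions : List String) :
    ∀ m i d, ((instructions.length : Int) - i).toNat ≤ m →
      -(instructions.length : Int) ≤ i → 0 ≤ d →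
      goA instructions d i = pvIter instructions (d.toNat + 1) i := by
  intro m
  induction m with
  | zero =>
    intro i d hm hlo hd
    have hi : ¬ i < (instructions.length : Int) := by omega
    rw [goA]
    simp only [dif_neg hi]
    show _ = pvIter instructions (d.toNat + 1) i
    have : pvIter instructions (d.toNat + 1) i = pvIter instructions d.toNat (pvF instructions i) := rfl
    rw [this, pvF_stop instructions i (by omega), pvIter_stop]
  | succ m ih =>
    intro i d hm hlo hd
    by_cases hi : i < (instructions.length : Int)
    · rw [goA]
      simp only [dif_pos hi]
      have hR : pvIter instructions (d.toNat + 1) i = pvIter instructions d.toNat (pvF instructions i) := rfl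
      rw [hR, pvF_unfold instructions i hlo hi]
      by_cases hs : (PySem.List.pyGet? instructions i).getD "" = "BLOCK_START"
      · rw [if_pos hs, if_pos hs]
        have : goA instructions (d + 1) (i + 1) =
            pvIter instructions ((d + 1).toNat + 1) (i + 1) :=
          ih (i + 1) (d + 1) (by omega) (by omega) (by omega)
        rw [this]
        have hk : (d + 1).toNat = d.toNat + 1 := by omega
        rw [hk]
        rfl
      · by_cases hE : (PySem.List.pyGet? instructions i).getD "" = "BLOCK_END"
        · rw [if_neg hs, if_neg hs, if_pos hE, if_pos hE]
          by_cases hd0 : d = 0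
          · rw [if_pos hd0, hd0]
            rfl
          · rw [if_neg hd0]
            have : goA instructions (d - 1) (i + 1) =
                pvIter instructions ((d - 1).toNat + 1) (i + 1) :=
              ih (i + 1) (d - 1) (by omega) (by omega) (by omega)
            rw [this]
            have hk : (d - 1).toNat + 1 = d.toNat := by omega
            rw [hk]
        · rw [if_neg hs, if_neg hs, if_neg hE, if_neg hE]
          have : goA instructions d (i + 1) =
              pvIter instructions (d.toNat + 1) (i + 1) :=
            ih (i + 1) d (by omega) (by omega) hd
          rw [this]
          rfl
    · rw [goA]
      simp only [dif_neg hi]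
      have : pvIter instructions (d.toNat + 1) i = pvIter instructions d.toNat (pvF instructions i) := rfl
      rw [this, pvF_stop instructions i (by omega), pvIter_stop]

-- ===== VERDICT (by name: the statement is the Claim_ definition above) =====
theorem find_block_end_spec : Claim_equal_find_block_end := by
  intro instructions start_index _ hpre
  unfold Spec_find_block_end find_block_end find_block_end_alt
  have h := goA_eq_iter instructions ((instructions.length : Int) - (start_index + 1)).toNat
    (start_index + 1) 0 le_rfl hpre le_rfl
  rw [h]
  rfl
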